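-- pv_equiv track=rewrite | github.com/shrivathsap/advent_of_code | 2024/day15/day15.py | move_right_wide
-- ===== SOURCE A (Python) =====
-- def move_right_wide(grid, rows, cols, current_pos):
--     new_grid = []
--     r, c = current_pos[0], current_pos[1]
--     new_pos = (0, 0)
--     for i in range(0, rows):
--         if i != r:
--             new_grid.append(grid[i])
--         else:
--             new_row = ""
--             for j in range(cols):
--                 if j<c:
--                     new_row += grid[i][j]
--                 else:
--                     if grid[i][j] == "#":
--                         new_row += "#"
--                     elif "#" in grid[i][c:j] or "." in grid[i][c:j]:
--                         new_row += grid[i][j]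
--                     elif grid[i][j] == ".":
--                         new_row += grid[i][j-1]
--                         if grid[i][j-1] == "@":
--                             new_pos = (i, j)
--                     elif grid[i][j] == "[" and "." in grid[i][j+1:]:
--                         if (grid[i][j+1:]).index(".")<(grid[i][j+1:]).index("#"):
--                             new_row += grid[i][j-1]
--                             if grid[i][j-1] == "@":
--                                 new_pos = (i, j)
--                         else:
--                             new_row += "["
--                     elif grid[i][j] == "]" and "." in grid[i][j+1:]:
--                         if (grid[i][j+1:]).index(".")<(grid[i][j+1:]).index("#"):
--                             new_row += grid[i][j-1]
--                         else:
--                             new_row += "]"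
--                     elif grid[i][j] == "@" and ("." in grid[i][j+1:]):
--                         if (grid[i][j+1:]).index(".")<(grid[i][j+1:]).index("#"):
--                             new_row += "."
--                             new_pos = (i, j+1)
--                         else:
--                             new_row += "@"
--                             new_pos = (i, j)
--                     else:
--                         new_row += grid[i][j]
--                         if grid[i][j] == "@":
--                             new_pos = (i, j)
--             new_grid.append(new_row)
--     return new_grid, new_pos
-- ===== SOURCE B (Python) =====
-- def move_right_wide(grid, rows, cols, current_pos):
--     r, c = current_pos[0], current_pos[1]
--     new_grid = [grid[i] for i in range(rows)]
--     new_pos = (0, 0)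
--     if 0 <= r < rows:
--         row = grid[r]
--         n = len(row)
--         # one backward pass: first '.' / first '#' at or after each index
--         nd = [None] * (n + 1)
--         nh = [None] * (n + 1)
--         for k in range(n - 1, -1, -1):
--             nd[k] = k if row[k] == '.' else nd[k + 1]
--             nh[k] = k if row[k] == '#' else nh[k + 1]
--         # m = first '.'-or-'#' at or after c (None if none / c out of range)
--         m = None
--         if 0 <= c <= n:
--             if nd[c] is None:
--                 m = nh[c]
--             elif nh[c] is None:
--                 m = nd[c]
--             else:
--                 m = min(nd[c], nh[c])
--         out = []
--         for j in range(cols):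
--             ch = row[j]
--             if j < c or ch == '#' or (m is not None and j > m):
--                 out.append(ch)
--             elif ch == '.':
--                 prev = row[j - 1]
--                 out.append(prev)
--                 if prev == '@':
--                     new_pos = (r, j)
--             elif ch in '[]':
--                 d = nd[j + 1] if j + 1 <= n else None
--                 h = nh[j + 1] if j + 1 <= n else None
--                 if d is not None and (h is None or d < h):
--                     prev = row[j - 1]
--                     out.append(prev)
--                     if ch == '[' and prev == '@':
--                         new_pos = (r, j)
--                 else:
--                     out.append(ch)
--             elif ch == '@':
--                 d = nd[j + 1] if j + 1 <= n else None
--                 h = nh[j + 1] if j + 1 <= n else None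
--                 if d is not None and (h is None or d < h):
--                     out.append('.')
--                     new_pos = (r, j + 1)
--                 else:
--                     out.append('@')
--                     new_pos = (r, j)
--             else:
--                 out.append(ch)
--         new_grid[r] = ''.join(out)
--     return new_grid, new_pos
-- ===== Notes on version B (the rewrite author's own statement) =====
-- stated objective: alternative
-- what changed: A rescans the row for every cell (slice membership tests and .index calls over the suffix); B instead precomputes next-'.' and next-'#' position arrays in one backward pass plus the first wall-or-gap at-or-after the robot, then emits each output cell from those arrays in a single forward pass.
-- outside the precondition, e.g. on move_right_wide(['#.'], 1, 2, (0, -2)): A returns (['#.'], (0, 0)), B returns (['##'], (0, 0)); on move_right_wide([], 1, 0, (0, 4)): A returns ([''], (0, 0)), B raises IndexError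
import Mathlib
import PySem

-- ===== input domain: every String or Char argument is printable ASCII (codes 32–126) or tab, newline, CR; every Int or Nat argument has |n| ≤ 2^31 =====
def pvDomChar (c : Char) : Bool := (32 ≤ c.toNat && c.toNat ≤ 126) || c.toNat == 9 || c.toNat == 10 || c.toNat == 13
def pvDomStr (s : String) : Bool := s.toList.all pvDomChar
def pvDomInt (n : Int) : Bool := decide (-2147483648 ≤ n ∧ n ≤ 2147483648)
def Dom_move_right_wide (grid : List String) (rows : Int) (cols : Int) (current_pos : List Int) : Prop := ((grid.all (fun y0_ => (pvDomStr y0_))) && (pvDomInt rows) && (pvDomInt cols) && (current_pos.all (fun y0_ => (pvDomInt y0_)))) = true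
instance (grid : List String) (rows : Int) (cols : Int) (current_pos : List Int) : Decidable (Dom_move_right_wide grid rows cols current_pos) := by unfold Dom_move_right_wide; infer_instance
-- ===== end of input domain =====

-- B replaces A's per-cell suffix rescans (slice membership and .index) by two next-'.'/next-'#'
-- position arrays built in one backward pass, then a single forward pass over the row.

-- ===== PORT A =====
-- inner-loop body of A (one j of the row loop); '.index' on the suffix is ported as
-- PySem.Chars.find, exact under Pre_ (whenever A compares the two indices, both characters
-- occur in the suffix).
def pvStepA (row : List Char) (c i : Int) (t : List Char × (Int × Int)) (j : Int) :
    List Char × (Int × Int) :=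
  if j < c then (t.1 ++ [PySem.List.pyGetD row j ' '], t.2)
  else if PySem.List.pyGetD row j ' ' = '#' then (t.1 ++ ['#'], t.2)
  else if (PySem.Chars.isIn ['#'] (PySem.List.slice row (some c) (some j))
        || PySem.Chars.isIn ['.'] (PySem.List.slice row (some c) (some j))) = true then
    (t.1 ++ [PySem.List.pyGetD row j ' '], t.2)
  else if PySem.List.pyGetD row j ' ' = '.' then
    (t.1 ++ [PySem.List.pyGetD row (j - 1) ' '],
     if PySem.List.pyGetD row (j - 1) ' ' = '@' then (i, j) else t.2)
  else if PySem.List.pyGetD row j ' ' = '[' ∧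
          PySem.Chars.isIn ['.'] (PySem.List.slice row (some (j + 1)) none) = true then
    (if PySem.Chars.find (PySem.List.slice row (some (j + 1)) none) ['.'] <
        PySem.Chars.find (PySem.List.slice row (some (j + 1)) none) ['#'] then
      (t.1 ++ [PySem.List.pyGetD row (j - 1) ' '],
       if PySem.List.pyGetD row (j - 1) ' ' = '@' then (i, j) else t.2)
    else (t.1 ++ ['['], t.2))
  else if PySem.List.pyGetD row j ' ' = ']' ∧
          PySem.Chars.isIn ['.'] (PySem.List.slice row (some (j + 1)) none) = true then
    (if PySem.Chars.find (PySem.List.slice row (some (j + 1)) none) ['.'] <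
        PySem.Chars.find (PySem.List.slice row (some (j + 1)) none) ['#'] then
      (t.1 ++ [PySem.List.pyGetD row (j - 1) ' '], t.2)
    else (t.1 ++ [']'], t.2))
  else if PySem.List.pyGetD row j ' ' = '@' ∧
          PySem.Chars.isIn ['.'] (PySem.List.slice row (some (j + 1)) none) = true then
    (if PySem.Chars.find (PySem.List.slice row (some (j + 1)) none) ['.'] <
        PySem.Chars.find (PySem.List.slice row (some (j + 1)) none) ['#'] then
      (t.1 ++ ['.'], (i, j + 1))
    else (t.1 ++ ['@'], (i, j)))
  else (t.1 ++ [PySem.List.pyGetD row j ' '],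
        if PySem.List.pyGetD row j ' ' = '@' then (i, j) else t.2)

-- outer-loop body of A (one i of the row loop)
def pvOuterA (grid : List String) (cols c r : Int) (st : List String × (Int × Int)) (i : Int) :
    List String × (Int × Int) :=
  if i ≠ r then (st.1 ++ [PySem.List.pyGetD grid i ""], st.2)
  else
    let row := (PySem.List.pyGetD grid i "").toList
    let inner := (PySem.List.pyRange 0 cols).foldl (pvStepA row c i) ([], st.2)
    (st.1 ++ [String.ofList inner.1], inner.2)

def move_right_wide (grid : List String) (rows : Int) (cols : Int) (current_pos : List Int) :
    List String × (Int × Int) :=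
  let r := PySem.List.pyGetD current_pos 0 0
  let c := PySem.List.pyGetD current_pos 1 0
  (PySem.List.pyRange 0 rows).foldl (pvOuterA grid cols c r) ([], (0, 0))

-- ===== PORT B =====
-- backward pass of Source B: pvNextArr row ch 0 is the array nd/nh (index t ↦ first position ≥ t holding ch)
def pvNextArr (s : List Char) (ch : Char) (k : Int) : List (Option Int) :=
  match s with
  | [] => [none]
  | a :: rest =>
    let tail := pvNextArr rest ch (k + 1)
    (if a = ch then some k else tail.headD none) :: tail

-- m of Source B: first '.'-or-'#' position at or after c (none if absent / c out of range)
def pvFirstHD (row : List Char) (c : Int) : Option Int :=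
  if 0 ≤ c ∧ c ≤ (row.length : Int) then
    match PySem.List.pyGetD (pvNextArr row '.' 0) c none,
          PySem.List.pyGetD (pvNextArr row '#' 0) c none with
    | none, hh => hh
    | dd, none => dd
    | some dv, some hv => some (min dv hv)
  else none

-- forward-pass body of Source B (one j)
def pvStepB (row : List Char) (c r : Int) (nd nh : List (Option Int)) (m : Option Int)
    (t : List Char × (Int × Int)) (j : Int) : List Char × (Int × Int) :=
  let n : Int := (row.length : Int)
  let ch := PySem.List.pyGetD row j ' '
  if (decide (j < c) || decide (ch = '#') || m.any fun mv => decide (mv < j)) = true then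
    (t.1 ++ [ch], t.2)
  else
    let d := if j + 1 ≤ n then PySem.List.pyGetD nd (j + 1) none else none
    let h := if j + 1 ≤ n then PySem.List.pyGetD nh (j + 1) none else none
    let shift := d.any fun dv => match h with | none => true | some hv => decide (dv < hv)
    if ch = '.' then
      let prev := PySem.List.pyGetD row (j - 1) ' '
      (t.1 ++ [prev], if prev = '@' then (r, j) else t.2)
    else if ch = '[' ∨ ch = ']' then
      if shift then
        let prev := PySem.List.pyGetD row (j - 1) ' '
        (t.1 ++ [prev], if ch = '[' ∧ prev = '@' then (r, j) else t.2)
      else (t.1 ++ [ch], t.2)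
    else if ch = '@' then
      if shift then (t.1 ++ ['.'], (r, j + 1)) else (t.1 ++ ['@'], (r, j))
    else (t.1 ++ [ch], t.2)

def move_right_wide_alt (grid : List String) (rows : Int) (cols : Int) (current_pos : List Int) :
    List String × (Int × Int) :=
  let r := PySem.List.pyGetD current_pos 0 0
  let c := PySem.List.pyGetD current_pos 1 0
  let new_grid := (PySem.List.pyRange 0 rows).map (fun i => PySem.List.pyGetD grid i "")
  if 0 ≤ r ∧ r < rows then
    let row := (PySem.List.pyGetD grid r "").toList
    let nd := pvNextArr row '.' 0
    let nh := pvNextArr row '#' 0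
    let m := pvFirstHD row c
    let inner := (PySem.List.pyRange 0 cols).foldl (pvStepB row c r nd nh m) ([], (0, 0))
    (PySem.List.pySetD new_grid r (String.ofList inner.1), inner.2)
  else (new_grid, (0, 0))

-- ===== PRECONDITION & SPEC =====
-- Pre_ excludes the inputs where A raises (current_pos shorter than 2; rows beyond the grid; a row
-- shorter than cols; a pushable '['/']'/'@' cell followed by a '.' but by no '#', where A's .index("#")
-- raises ValueError) and two corners where A still returns but no caller would specify the behaviour:
-- a negative column coordinate (A's slice grid[i][c:j] then counts from the string's END) and
-- rows = len(grid)+1 with current_pos naming the phantom row while cols ≤ 0 (cites in claim.json).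
def Pre_move_right_wide (grid : List String) (rows : Int) (cols : Int) (current_pos : List Int) : Prop :=
  2 ≤ current_pos.length ∧
  (0 < rows → rows ≤ (grid.length : Int)) ∧
  ((0 ≤ PySem.List.pyGetD current_pos 0 0 ∧ PySem.List.pyGetD current_pos 0 0 < rows) →
    (0 ≤ PySem.List.pyGetD current_pos 1 0 ∧
     (0 < cols →
        cols ≤ (((PySem.List.pyGetD grid (PySem.List.pyGetD current_pos 0 0) "").toList.length : Int))) ∧
     ¬ ∃ j ∈ List.range (PySem.List.pyGetD grid (PySem.List.pyGetD current_pos 0 0) "").toList.length,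
        (let row := (PySem.List.pyGetD grid (PySem.List.pyGetD current_pos 0 0) "").toList
         PySem.List.pyGetD current_pos 1 0 ≤ (j : Int) ∧ (j : Int) < cols ∧
         (row.getD j ' ' = '[' ∨ row.getD j ' ' = ']' ∨ row.getD j ' ' = '@') ∧
         (∀ t ∈ List.range j, PySem.List.pyGetD current_pos 1 0 ≤ (t : Int) →
            (row.getD t ' ' ≠ '#' ∧ row.getD t ' ' ≠ '.')) ∧
         '.' ∈ row.drop (j + 1) ∧ '#' ∉ row.drop (j + 1))))
instance (grid : List String) (rows : Int) (cols : Int) (current_pos : List Int) :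
    Decidable (Pre_move_right_wide grid rows cols current_pos) := by
  unfold Pre_move_right_wide; infer_instance

def pvWitness_move_right_wide : List String × Int × Int × List Int := (["#@.#"], 1, 4, [0, 1])

def Spec_move_right_wide (grid : List String) (rows : Int) (cols : Int) (current_pos : List Int) (out : List String × (Int × Int)) : Prop := out = move_right_wide_alt grid rows cols current_pos
instance (grid : List String) (rows : Int) (cols : Int) (current_pos : List Int) (out : List String × (Int × Int)) : Decidable (Spec_move_right_wide grid rows cols current_pos out) := by unfold Spec_move_right_wide; infer_instance

-- ===== CLAIM (what is proved, stated in full; the proofs are below) =====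
def Claim_equal_move_right_wide : Prop := ∀ (grid : List String) (rows : Int) (cols : Int) (current_pos : List Int), Dom_move_right_wide grid rows cols current_pos → Pre_move_right_wide grid rows cols current_pos → Spec_move_right_wide grid rows cols current_pos (move_right_wide grid rows cols current_pos)

-- ===== LEMMAS AND PROOFS =====

theorem pvNextArr_getD (s : List Char) (ch : Char) (k : Int) (t : Nat) (ht : t ≤ s.length) :
    (pvNextArr s ch k).getD t none
      = ((s.drop t).findIdx? (fun a => a == ch)).map (fun u => k + (t : Int) + (u : Int)) := by
  induction s generalizing k t with
  | nil =>
    have : t = 0 := by simpa using ht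
    subst this; simp [pvNextArr]
  | cons a rest ih =>
    cases t with
    | zero =>
      have h0 : (pvNextArr rest ch (k + 1)).headD none = (pvNextArr rest ch (k + 1)).getD 0 none := by
        cases hrec : pvNextArr rest ch (k + 1) <;> simp
      simp only [pvNextArr, List.getD_cons_zero, List.drop_zero, List.findIdx?_cons]
      by_cases hach : a = ch
      · simp [hach]
      · simp only [hach, beq_iff_eq, if_false]
        rw [h0, ih (k + 1) 0 (by omega)]
        simp only [List.drop_zero]
        rcases hfi : rest.findIdx? (fun a => a == ch) with _ | u <;> simp <;> push_cast <;> ring_nf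
    | succ t' =>
      simp only [pvNextArr, List.getD_cons_succ, List.drop_succ_cons]
      rw [ih (k + 1) t' (by simpa using ht)]
      rcases hfi : (rest.drop t').findIdx? (fun a => a == ch) with _ | u <;> simp <;> push_cast <;> ring_nf

def pvFi (row : List Char) (ch : Char) (t : Nat) : Option Nat :=
  (row.drop t).findIdx? (fun a => a == ch)

theorem pvFi_none_iff (row : List Char) (ch : Char) (t : Nat) :
    pvFi row ch t = none ↔ ∀ w, t ≤ w → w < row.length → row.getD w ' ' ≠ ch := by
  rw [pvFi, List.findIdx?_eq_none_iff]
  constructor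
  · intro h w hw1 hw2
    have hmem : row[w] ∈ row.drop t := by
      rw [List.mem_iff_getElem]
      exact ⟨w - t, by simp; omega, by rw [List.getElem_drop]; congr 1; omega⟩
    have := h _ hmem
    rw [List.getD_eq_getElem _ _ hw2]
    simpa using this
  · intro h x hx
    rw [List.mem_iff_getElem] at hx
    obtain ⟨i, hi, hxe⟩ := hx
    have hlen : t + i < row.length := by have := List.length_drop (l := row) (i := t); omega
    have := h (t + i) (by omega) hlen
    rw [List.getD_eq_getElem _ _ hlen] at this
    rw [List.getElem_drop] at hxe
    simp [← hxe, this]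

theorem pvFi_some_iff (row : List Char) (ch : Char) (t : Nat) (u : Nat) :
    pvFi row ch t = some u ↔
      t + u < row.length ∧ row.getD (t + u) ' ' = ch ∧
        ∀ w, t ≤ w → w < t + u → row.getD w ' ' ≠ ch := by
  rw [pvFi, List.findIdx?_eq_some_iff_getElem]
  constructor
  · rintro ⟨h, hp, hmin⟩
    have hlen : t + u < row.length := by have := List.length_drop (l := row) (i := t); omega
    refine ⟨hlen, ?_, ?_⟩
    · rw [List.getElem_drop] at hp
      rw [List.getD_eq_getElem _ _ hlen]
      simpa using hp
    · intro w hw1 hw2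
      have hwl : w < row.length := by omega
      have := hmin (w - t) (by omega)
      rw [List.getElem_drop] at this
      rw [List.getD_eq_getElem _ _ hwl]
      intro he
      apply this
      simp only [beq_iff_eq]
      have : row[t + (w - t)] = row[w]'hwl := by congr 1; omega
      rw [this]
      exact he
  · rintro ⟨hlen, hp, hmin⟩
    have hu : u < (row.drop t).length := by simp; omega
    refine ⟨hu, ?_, ?_⟩
    · rw [List.getElem_drop]
      rw [List.getD_eq_getElem _ _ hlen] at hp
      simpa using hp
    · intro w hw
      rw [List.getElem_drop]
      have hwl : t + w < row.length := by omega
      have := hmin (t + w) (by omega) (by omega)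
      rw [List.getD_eq_getElem _ _ hwl] at this
      simpa using this

theorem pvMem_drop_iff (row : List Char) (ch : Char) (t : Nat) :
    ch ∈ row.drop t ↔ pvFi row ch t ≠ none := by
  rw [Ne, pvFi, List.findIdx?_eq_none_iff]
  constructor
  · intro hm h
    have := h _ hm
    simp at this
  · intro h
    by_contra hm
    exact h fun x hx => by simpa using fun he : x = ch => hm (he ▸ hx)

theorem pvPrefix_singleton_iff (ch : Char) (xs : List Char) :
    [ch] <+: xs ↔ xs.head? = some ch := by
  constructor
  · rintro ⟨t, rfl⟩; rfl
  · intro h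
    cases xs with
    | nil => simp at h
    | cons a t => simp at h; exact ⟨t, by simp [h]⟩

theorem pvPrefix_singleton_drop (l : List Char) (ch : Char) (v : Nat) :
    [ch] <+: l.drop v ↔ l[v]? = some ch := by
  rw [pvPrefix_singleton_iff, List.head?_drop]

theorem pvFind_singleton (l : List Char) (ch : Char) :
    PySem.Chars.find l [ch] =
      match l.findIdx? (fun a => a == ch) with
      | some u => (u : Int)
      | none => -1 := by
  cases hfi : l.findIdx? (fun a => a == ch) with
  | none =>
    have hnm : ch ∉ l := by
      rw [List.findIdx?_eq_none_iff] at hfi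
      intro hm; simpa using hfi _ hm
    have hni : ¬ [ch] <:+: l := fun hinf => hnm ((List.singleton_infix_iff ch l).mp hinf)
    simpa using (PySem.Chars.find_eq_neg_one_iff (s := l) (sub := [ch])).mpr hni
  | some u =>
    rw [List.findIdx?_eq_some_iff_getElem] at hfi
    obtain ⟨hu, hp, hmin⟩ := hfi
    simp only [beq_iff_eq] at hp hmin
    have hmem : ch ∈ l := by rw [← hp]; exact List.getElem_mem hu
    have hinf : [ch] <:+: l := (List.singleton_infix_iff ch l).mpr hmem
    have h0 : 0 ≤ PySem.Chars.find l [ch] := (PySem.Chars.find_nonneg_iff _ _).mpr hinf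
    obtain ⟨hpre, hmin'⟩ := PySem.Chars.find_spec h0
    rw [pvPrefix_singleton_drop] at hpre
    have hFlt : (PySem.Chars.find l [ch]).toNat < l.length := by
      by_contra hge
      rw [List.getElem?_eq_none (by omega)] at hpre
      simp at hpre
    rw [List.getElem?_eq_getElem hFlt] at hpre
    have hF : l[(PySem.Chars.find l [ch]).toNat] = ch := by simpa using hpre
    have hne1 : ¬ u < (PySem.Chars.find l [ch]).toNat := by
      intro hlt
      exact hmin' u hlt ((pvPrefix_singleton_drop l ch u).mpr (by rw [List.getElem?_eq_getElem hu, hp]))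
    have hne2 : ¬ (PySem.Chars.find l [ch]).toNat < u := fun hlt => hmin _ hlt hF
    simp only []
    omega

theorem pvIsIn_singleton_mem (ch : Char) (s : List Char) :
    PySem.Chars.isIn [ch] s = true ↔ ch ∈ s := by
  rw [PySem.Chars.isIn_iff_infix, List.singleton_infix_iff]

theorem pvNext_lookup (row : List Char) (ch : Char) (j : Int) (h0 : 0 ≤ j)
    (hle : j ≤ (row.length : Int)) :
    PySem.List.pyGetD (pvNextArr row ch 0) j none
      = (pvFi row ch j.toNat).map (fun u => j + (u : Int)) := by
  obtain ⟨n, rfl⟩ : ∃ n : Nat, j = (n : Int) := ⟨j.toNat, by omega⟩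
  rw [PySem.List.pyGetD_natCast, pvNextArr_getD row ch 0 n (by omega)]
  cases hfi : (row.drop n).findIdx? (fun a => a == ch) <;> simp [pvFi, hfi]

theorem pvFirstHD_eq (row : List Char) (c : Int) (hc : 0 ≤ c) (hcn : c ≤ (row.length : Int)) :
    pvFirstHD row c =
      (match pvFi row '.' c.toNat, pvFi row '#' c.toNat with
        | none, none => none
        | none, some hu => some (c + hu)
        | some du, none => some (c + du)
        | some du, some hu => some (c + min du hu)) := by
  unfold pvFirstHD
  rw [if_pos ⟨hc, hcn⟩, pvNext_lookup row '.' c hc hcn, pvNext_lookup row '#' c hc hcn]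
  cases pvFi row '.' c.toNat <;> cases pvFi row '#' c.toNat <;> simp [min_def] <;> omega

theorem pvMem_slice_iff (row : List Char) (c j : Int) (ch : Char) (hc : 0 ≤ c) (hcj : c ≤ j)
    (hjn : j ≤ (row.length : Int)) :
    ch ∈ PySem.List.slice row (some c) (some j) ↔
      ∃ w : Nat, c ≤ (w : Int) ∧ (w : Int) < j ∧ row.getD w ' ' = ch := by
  rw [PySem.List.slice_toNat row hc (by omega)]
  constructor
  · intro hm
    rw [List.mem_iff_getElem] at hm
    obtain ⟨i, hi, he⟩ := hm
    have hlen : i < j.toNat - c.toNat := by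
      simp only [List.length_take, List.length_drop] at hi; omega
    have hlt : c.toNat + i < row.length := by omega
    refine ⟨c.toNat + i, by omega, by omega, ?_⟩
    rw [List.getD_eq_getElem _ _ hlt, ← he, List.getElem_take, List.getElem_drop]
  · rintro ⟨w, hw1, hw2, hw3⟩
    have hwl : w < row.length := by omega
    rw [List.mem_iff_getElem]
    refine ⟨w - c.toNat, ?_, ?_⟩
    · simp only [List.length_take, List.length_drop]; omega
    · rw [List.getElem_take, List.getElem_drop, ← List.getD_eq_getElem row ' ' (by omega : c.toNat + (w - c.toNat) < row.length)]
      rw [show c.toNat + (w - c.toNat) = w by omega]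
      exact hw3

theorem pvSliceTest_iff (row : List Char) (c j : Int) (hc : 0 ≤ c) (hcj : c ≤ j)
    (hjn : j ≤ (row.length : Int)) :
    ((PySem.Chars.isIn ['#'] (PySem.List.slice row (some c) (some j))
      || PySem.Chars.isIn ['.'] (PySem.List.slice row (some c) (some j))) = true)
    ↔ ((pvFirstHD row c).any fun mv => decide (mv < j)) = true := by
  rw [Bool.or_eq_true, pvIsIn_singleton_mem, pvIsIn_singleton_mem,
      pvMem_slice_iff row c j '#' hc hcj hjn, pvMem_slice_iff row c j '.' hc hcj hjn,
      pvFirstHD_eq row c hc (le_trans hcj hjn)]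
  rcases hd : pvFi row '.' c.toNat with _ | du <;> rcases hh : pvFi row '#' c.toNat with _ | hu
  · rw [pvFi_none_iff] at hd hh
    simp only [Option.any_none]
    constructor
    · rintro (⟨w, h1, h2, h3⟩ | ⟨w, h1, h2, h3⟩)
      · exact absurd h3 (hh w (by omega) (by omega))
      · exact absurd h3 (hd w (by omega) (by omega))
    · intro h; exact absurd h (by simp)
  · rw [pvFi_none_iff] at hd
    rw [pvFi_some_iff] at hh
    obtain ⟨hh1, hh2, hh3⟩ := hh
    simp only [Option.any_some, decide_eq_true_eq]
    constructor
    · rintro (⟨w, h1, h2, h3⟩ | ⟨w, h1, h2, h3⟩)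
      · by_cases hw : w < c.toNat + hu
        · exact absurd h3 (hh3 w (by omega) (by omega))
        · omega
      · exact absurd h3 (hd w (by omega) (by omega))
    · intro h
      exact Or.inl ⟨c.toNat + hu, by omega, by omega, hh2⟩
  · rw [pvFi_none_iff] at hh
    rw [pvFi_some_iff] at hd
    obtain ⟨hd1, hd2, hd3⟩ := hd
    simp only [Option.any_some, decide_eq_true_eq]
    constructor
    · rintro (⟨w, h1, h2, h3⟩ | ⟨w, h1, h2, h3⟩)
      · exact absurd h3 (hh w (by omega) (by omega))
      · by_cases hw : w < c.toNat + du
        · exact absurd h3 (hd3 w (by omega) (by omega))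
        · omega
    · intro h
      exact Or.inr ⟨c.toNat + du, by omega, by omega, hd2⟩
  · rw [pvFi_some_iff] at hd hh
    obtain ⟨hd1, hd2, hd3⟩ := hd
    obtain ⟨hh1, hh2, hh3⟩ := hh
    simp only [Option.any_some, decide_eq_true_eq]
    constructor
    · rintro (⟨w, h1, h2, h3⟩ | ⟨w, h1, h2, h3⟩)
      · by_cases hw : w < c.toNat + hu
        · exact absurd h3 (hh3 w (by omega) (by omega))
        · omega
      · by_cases hw : w < c.toNat + du
        · exact absurd h3 (hd3 w (by omega) (by omega))
        · omega
    · intro h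
      by_cases hmin : du ≤ hu
      · exact Or.inr ⟨c.toNat + du, by omega, by omega, hd2⟩
      · exact Or.inl ⟨c.toNat + hu, by omega, by omega, hh2⟩

theorem pvStep_eq (row : List Char) (c r cols j : Int)
    (hc : 0 ≤ c) (hj : 0 ≤ j) (hjc : j < cols) (hcols : cols ≤ (row.length : Int))
    (hnc : ¬ ∃ jj ∈ List.range row.length,
        c ≤ (jj : Int) ∧ (jj : Int) < cols ∧
        (row.getD jj ' ' = '[' ∨ row.getD jj ' ' = ']' ∨ row.getD jj ' ' = '@') ∧
        (∀ t ∈ List.range jj, c ≤ (t : Int) → (row.getD t ' ' ≠ '#' ∧ row.getD t ' ' ≠ '.')) ∧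
        '.' ∈ row.drop (jj + 1) ∧ '#' ∉ row.drop (jj + 1))
    (t : List Char × (Int × Int)) :
    pvStepA row c r t j
      = pvStepB row c r (pvNextArr row '.' 0) (pvNextArr row '#' 0) (pvFirstHD row c) t j := by
  obtain ⟨jn, rfl⟩ : ∃ n : Nat, j = (n : Int) := ⟨j.toNat, by omega⟩
  by_cases hjlt : (jn : Int) < c
  · simp [pvStepA, pvStepB, hjlt]
  have hcj : c ≤ (jn : Int) := le_of_not_gt hjlt
  have hjn : jn < row.length := by omega
  have hget : PySem.List.pyGetD row (jn : Int) ' ' = row.getD jn ' ' := by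
    rw [PySem.List.pyGetD_natCast]
  by_cases hchh : row.getD jn ' ' = '#'
  · simp [-List.getD_eq_getElem?_getD, pvStepA, pvStepB, hjlt, hget, hchh]
  by_cases hS : (PySem.Chars.isIn ['#'] (PySem.List.slice row (some c) (some (jn : Int)))
      || PySem.Chars.isIn ['.'] (PySem.List.slice row (some c) (some (jn : Int)))) = true
  · have hB := (pvSliceTest_iff row c (jn : Int) hc hcj (by omega)).mp hS
    simp [-List.getD_eq_getElem?_getD, pvStepA, pvStepB, hjlt, hget, hchh, hS, hB]
  · have hBf : ((pvFirstHD row c).any fun mv => decide (mv < (jn : Int))) = false := by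
      rw [Bool.eq_false_iff]
      intro h
      exact hS ((pvSliceTest_iff row c (jn : Int) hc hcj (by omega)).mpr h)
    have hsuf : PySem.List.slice row (some ((jn : Int) + 1)) none = row.drop (jn + 1) := by
      rw [PySem.List.slice_from _ (by omega)]
      have : ((jn : Int) + 1).toNat = jn + 1 := by omega
      rw [this]
    have hreg : ∀ w : Nat, c ≤ (w : Int) → (w : Int) < (jn : Int) →
        row.getD w ' ' ≠ '#' ∧ row.getD w ' ' ≠ '.' := by
      intro w hw1 hw2
      constructor <;> intro he <;> apply hS <;> rw [Bool.or_eq_true, pvIsIn_singleton_mem,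
        pvIsIn_singleton_mem, pvMem_slice_iff row c _ '#' hc hcj (by omega),
        pvMem_slice_iff row c _ '.' hc hcj (by omega)]
      · exact Or.inl ⟨w, hw1, hw2, he⟩
      · exact Or.inr ⟨w, hw1, hw2, he⟩
    have hdn : ((jn : Int) + 1) ≤ (row.length : Int) := by omega
    have htn : ((jn : Int) + 1).toNat = jn + 1 := by omega
    have hd_eq : PySem.List.pyGetD (pvNextArr row '.' 0) ((jn : Int) + 1) none
        = (pvFi row '.' (jn + 1)).map (fun u => ((jn : Int) + 1) + (u : Int)) := by
      rw [pvNext_lookup row '.' _ (by omega) hdn, htn]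
    have hh_eq : PySem.List.pyGetD (pvNextArr row '#' 0) ((jn : Int) + 1) none
        = (pvFi row '#' (jn + 1)).map (fun u => ((jn : Int) + 1) + (u : Int)) := by
      rw [pvNext_lookup row '#' _ (by omega) hdn, htn]
    by_cases hchd : row.getD jn ' ' = '.'
    · simp [-List.getD_eq_getElem?_getD, pvStepA, pvStepB, hjlt, hget, hchh, hS, hBf, hchd]
    rcases hdo : pvFi row '.' (jn + 1) with _ | du
    · -- no '.' after j
      have hnodot : PySem.Chars.isIn ['.'] (row.drop (jn + 1)) = false := by
        rw [Bool.eq_false_iff, Ne, pvIsIn_singleton_mem, pvMem_drop_iff]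
        simp [hdo]
      by_cases hch1 : row.getD jn ' ' = '['
      · simp [-List.getD_eq_getElem?_getD, pvStepA, pvStepB, hsuf, hget, hd_eq, hh_eq, hdo,
          hnodot, hjlt, hjn, hchh, hS, hBf, hchd, hch1]
      · by_cases hch2 : row.getD jn ' ' = ']'
        · simp [-List.getD_eq_getElem?_getD, pvStepA, pvStepB, hsuf, hget, hd_eq, hh_eq, hdo,
            hnodot, hjlt, hjn, hchh, hS, hBf, hchd, hch1, hch2]
        · by_cases hch3 : row.getD jn ' ' = '@'
          · simp [-List.getD_eq_getElem?_getD, pvStepA, pvStepB, hsuf, hget, hd_eq, hh_eq, hdo,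
              hnodot, hjlt, hjn, hchh, hS, hBf, hchd, hch1, hch2, hch3]
          · simp [-List.getD_eq_getElem?_getD, pvStepA, pvStepB, hsuf, hget, hd_eq, hh_eq, hdo,
              hnodot, hjlt, hjn, hchh, hS, hBf, hchd, hch1, hch2, hch3]
    · rcases hho : pvFi row '#' (jn + 1) with _ | hu
      · -- a '.' after j but no '#': excluded for pushable cells, final-else otherwise
        have hdot : '.' ∈ row.drop (jn + 1) := by
          rw [pvMem_drop_iff]; simp [hdo]
        have hnohash : '#' ∉ row.drop (jn + 1) := by
          rw [pvMem_drop_iff]; simp [hho]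
        by_cases hbox : row.getD jn ' ' = '[' ∨ row.getD jn ' ' = ']' ∨ row.getD jn ' ' = '@'
        · exfalso
          exact hnc ⟨jn, by simp [hjn], hcj, hjc, hbox,
            fun w hw hcw => hreg w hcw (by simp at hw; omega), hdot, hnohash⟩
        · simp only [not_or] at hbox
          obtain ⟨hbox1, hbox23⟩ := hbox
          obtain ⟨hb2, hb3⟩ := hbox23
          have hb1 := hbox1
          simp [-List.getD_eq_getElem?_getD, pvStepA, pvStepB, hsuf, hget, hjlt, hjn, hchh,
            hS, hBf, hchd, hb1, hb2, hb3]
      · -- both a '.' and a '#' after j: compare their first positions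
        have hdot : PySem.Chars.isIn ['.'] (row.drop (jn + 1)) = true := by
          rw [pvIsIn_singleton_mem, pvMem_drop_iff]; simp [hdo]
        have hfindd : PySem.Chars.find (row.drop (jn + 1)) ['.'] = (du : Int) := by
          rw [pvFind_singleton]
          have h' : (row.drop (jn + 1)).findIdx? (fun a => a == '.') = some du := hdo
          rw [h']
        have hfindh : PySem.Chars.find (row.drop (jn + 1)) ['#'] = (hu : Int) := by
          rw [pvFind_singleton]
          have h' : (row.drop (jn + 1)).findIdx? (fun a => a == '#') = some hu := hho
          rw [h']
        by_cases hcmp : (du : Int) < (hu : Int)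
        all_goals have hcmp' : (((jn : Int) + 1 + du) < ((jn : Int) + 1 + hu)) ↔ ((du : Int) < (hu : Int)) := by omega
        all_goals (
          by_cases hch1 : row.getD jn ' ' = '['
          case pos => simp [-List.getD_eq_getElem?_getD, pvStepA, pvStepB, hsuf, hget, hd_eq,
            hh_eq, hdo, hho, hdot, hfindd, hfindh, hjlt, hjn, hchh, hS, hBf, hchd, hcmp, hcmp', hch1]
          case neg =>
          by_cases hch2 : row.getD jn ' ' = ']'
          case pos => simp [-List.getD_eq_getElem?_getD, pvStepA, pvStepB, hsuf, hget, hd_eq,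
            hh_eq, hdo, hho, hdot, hfindd, hfindh, hjlt, hjn, hchh, hS, hBf, hchd, hcmp, hcmp', hch1, hch2]
          case neg =>
          by_cases hch3 : row.getD jn ' ' = '@'
          case pos => simp [-List.getD_eq_getElem?_getD, pvStepA, pvStepB, hsuf, hget, hd_eq,
            hh_eq, hdo, hho, hdot, hfindd, hfindh, hjlt, hjn, hchh, hS, hBf, hchd, hcmp, hcmp', hch1, hch2, hch3]
          case neg => simp [-List.getD_eq_getElem?_getD, pvStepA, pvStepB, hsuf, hget, hd_eq,
            hh_eq, hdo, hho, hdot, hfindd, hfindh, hjlt, hjn, hchh, hS, hBf, hchd, hcmp, hcmp', hch1, hch2, hch3])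

theorem pvFoldCopy (grid : List String) (cols c r : Int) (l : List Int)
    (hne : ∀ i ∈ l, i ≠ r) (acc : List String) (p : Int × Int) :
    l.foldl (pvOuterA grid cols c r) (acc, p)
      = (acc ++ l.map (fun i => PySem.List.pyGetD grid i ""), p) := by
  rw [PySem.List.foldl_congr_mem' l _
      (fun st i => (st.1 ++ [PySem.List.pyGetD grid i ""], st.2)) _
      (fun i hi st => by simp [pvOuterA, hne i hi])]
  rw [PySem.List.foldl_prod_mk (f := fun s i => s ++ [PySem.List.pyGetD grid i ""])
      (g := fun (s : Int × Int) (_ : Int) => s)]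
  rw [PySem.List.foldl_append_singleton_eq_map, PySem.List.foldl_ignore]

-- ===== VERDICT (by name: the statement is the Claim_ definition above) =====
theorem move_right_wide_spec : Claim_equal_move_right_wide := by
  unfold Claim_equal_move_right_wide
  intro grid rows cols cp hdom hpre
  unfold Spec_move_right_wide
  obtain ⟨hlen2, hrows, hrc⟩ := hpre
  unfold move_right_wide move_right_wide_alt
  dsimp only
  by_cases hr : 0 ≤ PySem.List.pyGetD cp 0 0 ∧ PySem.List.pyGetD cp 0 0 < rows
  · obtain ⟨hc0, hcols, hnc⟩ := hrc hr
    set r := PySem.List.pyGetD cp 0 0 with hrdef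
    set c := PySem.List.pyGetD cp 1 0 with hcdef
    set row := (PySem.List.pyGetD grid r "").toList with hrowdef
    have hinner : (PySem.List.pyRange 0 cols).foldl (pvStepA row c r) ([], (0, 0))
        = (PySem.List.pyRange 0 cols).foldl
            (pvStepB row c r (pvNextArr row '.' 0) (pvNextArr row '#' 0) (pvFirstHD row c))
            ([], (0, 0)) := by
      apply PySem.List.foldl_congr_mem'
      intro j hj t
      rw [PySem.List.mem_pyRange_one] at hj
      exact pvStep_eq row c r cols j hc0 hj.1 hj.2 (hcols (by omega)) hnc t
    have hsplit : PySem.List.pyRange 0 rows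
        = PySem.List.pyRange 0 r ++ r :: PySem.List.pyRange (r + 1) rows := by
      rw [PySem.List.pyRange_one_append 0 r rows hr.1 (le_of_lt hr.2),
        PySem.List.pyRange_one_cons hr.2]
    rw [if_pos hr, hsplit, List.foldl_append, List.foldl_cons]
    rw [pvFoldCopy grid cols c r _
      (fun i hi => by rw [PySem.List.mem_pyRange_one] at hi; omega) [] (0, 0)]
    have hstep_r : pvOuterA grid cols c r
        ([] ++ (PySem.List.pyRange 0 r).map (fun i => PySem.List.pyGetD grid i ""), (0, 0)) r
        = ([] ++ (PySem.List.pyRange 0 r).map (fun i => PySem.List.pyGetD grid i "")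
            ++ [String.ofList ((PySem.List.pyRange 0 cols).foldl
                (pvStepB row c r (pvNextArr row '.' 0) (pvNextArr row '#' 0) (pvFirstHD row c))
                ([], (0, 0))).1],
           ((PySem.List.pyRange 0 cols).foldl
                (pvStepB row c r (pvNextArr row '.' 0) (pvNextArr row '#' 0) (pvFirstHD row c))
                ([], (0, 0))).2) := by
      simp only [pvOuterA, ne_eq, not_true_eq_false, if_false, ← hrowdef, hinner]
    rw [hstep_r]
    rw [pvFoldCopy grid cols c r _
      (fun i hi => by rw [PySem.List.mem_pyRange_one] at hi; omega)]
    rw [List.map_append, List.map_cons, PySem.List.pySetD_of_nonneg _ _ hr.1, List.set_append]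
    have hlen1 : ((PySem.List.pyRange 0 r).map (fun i => PySem.List.pyGetD grid i "")).length
        = r.toNat := by
      rw [List.length_map, PySem.List.length_pyRange_one]; omega
    rw [if_neg (by omega)]
    rw [show r.toNat - ((PySem.List.pyRange 0 r).map
        (fun i => PySem.List.pyGetD grid i "")).length = 0 by omega]
    simp
  · rw [if_neg hr]
    rw [pvFoldCopy grid cols (PySem.List.pyGetD cp 1 0) (PySem.List.pyGetD cp 0 0) _
      (fun i hi => by rw [PySem.List.mem_pyRange_one] at hi; omega) [] (0, 0)]
    simp
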